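-- pv_equiv track=rewrite | github.com/East-kang/Programming | 프로그래머스/2/77485. 행렬 테두리 회전하기/행렬 테두리 회전하기.py | solution
-- ===== SOURCE A (Python) =====
-- def solution(rows, columns, queries):
--     answer = []
--     n = 0
--     table = [[0 for _ in range(columns)] for _ in range(rows)]
--
--     for row in range(rows):
--         for col in range(columns):
--             n += 1
--             table[row][col] = n
--
--     for query in queries:
--         tmp = []
--         x1, y1, x2, y2 = query[0]-1, query[1]-1, query[2]-1, query[3]-1
--         for y in range(y1, y2):
--             tmp.append(table[x1][y])
--         for x in range(x1, x2):
--             tmp.append(table[x][y2])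
--         for y in range(y2, y1, -1):
--             tmp.append(table[x2][y])
--         for x in range(x2, x1, -1):
--             tmp.append(table[x][y1])
--         answer.append(min(tmp))
--
--         i = 0
--         for y in range(y1+1, y2+1):
--             table[x1][y] = tmp[i]
--             i+=1
--         for x in range(x1+1, x2+1):
--             table[x][y2] = tmp[i]
--             i+=1
--         for y in range(y2-1, y1-1, -1):
--             table[x2][y] = tmp[i]
--             i+=1
--         for x in range(x2-1, x1-1, -1):
--             table[x][y1] = tmp[i]
--             i+=1
--     return answer
-- ===== SOURCE B (Python) =====
-- def solution(rows, columns, queries):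
--     answer = []
--     n = 0
--     table = [[0 for _ in range(columns)] for _ in range(rows)]
--
--     for row in range(rows):
--         for col in range(columns):
--             n += 1
--             table[row][col] = n
--
--     for query in queries:
--         x1, y1, x2, y2 = query[0]-1, query[1]-1, query[2]-1, query[3]-1
--         # one clockwise shift of the border using a single temporary,
--         # tracking the minimum of the border cells on the way
--         prev = table[x1][y1]
--         best = prev
--         cells = [(x1, y) for y in range(y1+1, y2+1)] \
--               + [(x, y2) for x in range(x1+1, x2+1)] \
--               + [(x2, y) for y in range(y2-1, y1-1, -1)] \
--               + [(x, y1) for x in range(x2-1, x1-1, -1)]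
--         for r, c in cells:
--             cur = table[r][c]
--             table[r][c] = prev
--             prev = cur
--             if cur < best:
--                 best = cur
--         answer.append(best)
--     return answer
-- ===== Notes on version B (the rewrite author's own statement) =====
-- stated objective: alternative
-- what changed: Each queried border ring is rotated in a single pass with one temporary and a running minimum (B), instead of A's two passes that first collect the whole perimeter into a tmp list and then write it back by index.
-- outside the precondition, e.g. on solution(3, 4, [[3, 1, 2, 2]]): A returns [6], B returns [5]; on solution(3, 3, [[0, 1, 2, 3]]): A returns [1], B returns [1]; on solution(3, 3, [[2, 2, 2, 2]]): A raises ValueError, B returns [5]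
import Mathlib
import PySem

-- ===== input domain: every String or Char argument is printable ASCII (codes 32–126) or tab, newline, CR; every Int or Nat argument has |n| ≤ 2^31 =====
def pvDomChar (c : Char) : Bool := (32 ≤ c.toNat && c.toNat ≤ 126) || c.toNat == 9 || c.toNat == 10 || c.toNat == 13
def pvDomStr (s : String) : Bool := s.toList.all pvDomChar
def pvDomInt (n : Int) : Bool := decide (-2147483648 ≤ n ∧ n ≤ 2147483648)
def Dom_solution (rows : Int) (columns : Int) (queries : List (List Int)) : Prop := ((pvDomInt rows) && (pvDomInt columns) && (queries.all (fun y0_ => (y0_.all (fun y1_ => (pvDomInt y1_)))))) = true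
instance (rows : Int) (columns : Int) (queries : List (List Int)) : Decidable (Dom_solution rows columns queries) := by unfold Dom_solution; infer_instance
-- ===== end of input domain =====

-- B rotates each border ring in place in ONE pass with a single temporary and a running
-- minimum, instead of A's two passes (collect the whole perimeter into `tmp`, then write it
-- back by index); same cost class, O(1) extra space per query (objective: alternative).

-- shared cell accessors: table[r][c] reads/writes; exact where the indices are in range
-- (guaranteed by Pre_solution; pyGetD/pySetD are the total forms of Python's indexing)
def getCell (t : List (List Int)) (r c : Int) : Int :=
  PySem.List.pyGetD (PySem.List.pyGetD t r []) c 0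

def setCell (t : List (List Int)) (r c : Int) (v : Int) : List (List Int) :=
  PySem.List.pySetD t r (PySem.List.pySetD (PySem.List.pyGetD t r []) c v)

-- the numbering loops (identical in A and in B's source: B builds `table` the same way)
def buildTable (rows columns : Int) : Int × List (List Int) :=
  let t0 := (PySem.List.pyRange 0 rows 1).map
    (fun _ => (PySem.List.pyRange 0 columns 1).map (fun _ => (0 : Int)))
  (PySem.List.pyRange 0 rows 1).foldl
    (fun st row => (PySem.List.pyRange 0 columns 1).foldl
      (fun st col => (st.1 + 1, setCell st.2 row col (st.1 + 1))) st)
    ((0 : Int), t0)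

-- ===== PORT A =====
-- one query of A: collect the perimeter into tmp, min(tmp), write tmp back shifted by index i
def aCore (t : List (List Int)) (x1 y1 x2 y2 : Int) : List (List Int) × Int :=
  let tmp := (PySem.List.pyRange y1 y2 1).foldl (fun acc y => acc ++ [getCell t x1 y]) []
  let tmp := (PySem.List.pyRange x1 x2 1).foldl (fun acc x => acc ++ [getCell t x y2]) tmp
  let tmp := (PySem.List.pyRange y2 y1 (-1)).foldl (fun acc y => acc ++ [getCell t x2 y]) tmp
  let tmp := (PySem.List.pyRange x2 x1 (-1)).foldl (fun acc x => acc ++ [getCell t x y1]) tmp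
  let m := (PySem.List.min? tmp (fun v => v)).getD 0   -- min(tmp); tmp ≠ [] under Pre_solution
  let st := ((0 : Int), t)
  let st := (PySem.List.pyRange (y1+1) (y2+1) 1).foldl
    (fun st y => (st.1 + 1, setCell st.2 x1 y (PySem.List.pyGetD tmp st.1 0))) st
  let st := (PySem.List.pyRange (x1+1) (x2+1) 1).foldl
    (fun st x => (st.1 + 1, setCell st.2 x y2 (PySem.List.pyGetD tmp st.1 0))) st
  let st := (PySem.List.pyRange (y2-1) (y1-1) (-1)).foldl
    (fun st y => (st.1 + 1, setCell st.2 x2 y (PySem.List.pyGetD tmp st.1 0))) st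
  let st := (PySem.List.pyRange (x2-1) (x1-1) (-1)).foldl
    (fun st x => (st.1 + 1, setCell st.2 x y1 (PySem.List.pyGetD tmp st.1 0))) st
  (st.2, m)

-- x1, y1, x2, y2 = query[0]-1, query[1]-1, query[2]-1, query[3]-1
def aQuery (t : List (List Int)) (query : List Int) : List (List Int) × Int :=
  aCore t (PySem.List.pyGetD query 0 0 - 1) (PySem.List.pyGetD query 1 0 - 1)
    (PySem.List.pyGetD query 2 0 - 1) (PySem.List.pyGetD query 3 0 - 1)

def solution (rows : Int) (columns : Int) (queries : List (List Int)) : List Int :=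
  (queries.foldl (fun st query =>
      let r := aQuery st.2 query
      (st.1 ++ [r.2], r.1))
    (([] : List Int), (buildTable rows columns).2)).1

-- ===== PORT B =====
-- one query of B: walk the shifted perimeter once with (prev, best, table)
def bCore (t : List (List Int)) (x1 y1 x2 y2 : Int) : List (List Int) × Int :=
  let prev := getCell t x1 y1
  let best := prev
  let cells := (PySem.List.pyRange (y1+1) (y2+1) 1).map (fun y => (x1, y))
            ++ (PySem.List.pyRange (x1+1) (x2+1) 1).map (fun x => (x, y2))
            ++ (PySem.List.pyRange (y2-1) (y1-1) (-1)).map (fun y => (x2, y))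
            ++ (PySem.List.pyRange (x2-1) (x1-1) (-1)).map (fun x => (x, y1))
  let st := cells.foldl (fun (st : Int × Int × List (List Int)) rc =>
      let cur := getCell st.2.2 rc.1 rc.2
      (cur, if cur < st.2.1 then cur else st.2.1, setCell st.2.2 rc.1 rc.2 st.1))
    (prev, best, t)
  (st.2.2, st.2.1)

-- for x1, y1, x2, y2 = query[0]-1, ... as in A
def bQuery (t : List (List Int)) (query : List Int) : List (List Int) × Int :=
  bCore t (PySem.List.pyGetD query 0 0 - 1) (PySem.List.pyGetD query 1 0 - 1)
    (PySem.List.pyGetD query 2 0 - 1) (PySem.List.pyGetD query 3 0 - 1)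

def solution_alt (rows : Int) (columns : Int) (queries : List (List Int)) : List Int :=
  (queries.foldl (fun st query =>
      let r := bQuery st.2 query
      (st.1 ++ [r.2], r.1))
    (([] : List Int), (buildTable rows columns).2)).1

-- ===== PRECONDITION & SPEC =====
-- Pre_solution excludes malformed or degenerate queries — fewer than 4 entries, coordinates
-- outside 1..rows / 1..columns (where Python either raises IndexError or silently wraps a
-- non-positive coordinate to the other side), or non-increasing rectangles (x1 ≥ x2 or
-- y1 ≥ y2) — on which A either raises (IndexError, or ValueError from min of an empty
-- perimeter) or returns a partial-rotation value that is an accident of its range arithmetic.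
def qOK (rows columns : Int) (q : List Int) : Bool :=
  decide (4 ≤ q.length) &&
  decide (1 ≤ q.getD 0 0) && decide (q.getD 0 0 < q.getD 2 0) && decide (q.getD 2 0 ≤ rows) &&
  decide (1 ≤ q.getD 1 0) && decide (q.getD 1 0 < q.getD 3 0) && decide (q.getD 3 0 ≤ columns)

def Pre_solution (rows : Int) (columns : Int) (queries : List (List Int)) : Prop :=
  ∀ q ∈ queries, qOK rows columns q = true
instance (rows : Int) (columns : Int) (queries : List (List Int)) : Decidable (Pre_solution rows columns queries) := by
  unfold Pre_solution; infer_instance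

def pvWitness_solution : Int × Int × List (List Int) := (3, 3, [[1, 1, 3, 3]])

def Spec_solution (rows : Int) (columns : Int) (queries : List (List Int)) (out : List Int) : Prop := out = solution_alt rows columns queries
instance (rows : Int) (columns : Int) (queries : List (List Int)) (out : List Int) : Decidable (Spec_solution rows columns queries out) := by unfold Spec_solution; infer_instance

-- ===== CLAIM (what is proved, stated in full; the proofs are below) =====
def Claim_equal_solution : Prop := ∀ (rows : Int) (columns : Int) (queries : List (List Int)), Dom_solution rows columns queries → Pre_solution rows columns queries → Spec_solution rows columns queries (solution rows columns queries)

-- ===== LEMMAS AND PROOFS =====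

-- total-form indexing at a nonnegative index is List.getD (glue over pyGetD_natCast)
lemma pyGetD_nonneg {α : Type} (xs : List α) (i : Int) (d : α) (hi : 0 ≤ i) :
    PySem.List.pyGetD xs i d = xs.getD i.toNat d := by
  obtain ⟨n, rfl⟩ := Int.eq_ofNat_of_zero_le hi
  rw [PySem.List.pyGetD_natCast]
  simp

-- read of a cell after writing a DIFFERENT cell (both coordinate pairs nonnegative)
lemma getCell_setCell_ne (t : List (List Int)) {r c r' c' : Int} (v : Int)
    (hr : 0 ≤ r) (hc : 0 ≤ c) (hr' : 0 ≤ r') (hc' : 0 ≤ c')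
    (hne : (r, c) ≠ (r', c')) :
    getCell (setCell t r c v) r' c' = getCell t r' c' := by
  have key : ∀ (T : List (List Int)), getCell T r' c' = (T.getD r'.toNat []).getD c'.toNat 0 := by
    intro T
    unfold getCell
    rw [pyGetD_nonneg _ _ _ hr', pyGetD_nonneg _ _ _ hc']
  have hset : setCell t r c v = t.set r.toNat ((t.getD r.toNat []).set c.toNat v) := by
    unfold setCell
    rw [PySem.List.pySetD_of_nonneg _ _ hr, PySem.List.pySetD_of_nonneg _ _ hc,
        pyGetD_nonneg _ _ _ hr]
  rw [key, key, hset]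
  rcases eq_or_ne r.toNat r'.toNat with h | h
  · have hrr : r = r' := by omega
    have hcc : c.toNat ≠ c'.toNat := by
      have : c ≠ c' := fun hc0 => hne (by rw [hrr, hc0])
      omega
    rw [← h]
    by_cases hlt : r.toNat < t.length
    · have hrow : (t.set r.toNat ((t.getD r.toNat []).set c.toNat v)).getD r.toNat []
          = (t.getD r.toNat []).set c.toNat v := by
        rw [List.getD_eq_getElem?_getD, List.getElem?_set_self hlt, Option.getD_some]
      rw [hrow, List.getD_eq_getElem?_getD, List.getD_eq_getElem?_getD
            (l := t.getD r.toNat []), List.getElem?_set_ne hcc]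
    · have h1 : (t.set r.toNat ((t.getD r.toNat []).set c.toNat v)).getD r.toNat [] = [] := by
        rw [List.getD_eq_getElem?_getD, List.getElem?_eq_none (by simpa using hlt)]
        rfl
      have h2 : t.getD r.toNat [] = [] := by
        rw [List.getD_eq_getElem?_getD, List.getElem?_eq_none (by omega)]
        rfl
      rw [h1, h2]
  · have hrow : (t.set r.toNat ((t.getD r.toNat []).set c.toNat v)).getD r'.toNat []
        = t.getD r'.toNat [] := by
      rw [List.getD_eq_getElem?_getD, List.getElem?_set_ne h]
      exact (List.getD_eq_getElem?_getD).symm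
    rw [hrow]

-- the perimeter positions written by a query (B's `cells`, and the targets of A's writes)
def writeCells (x1 y1 x2 y2 : Int) : List (Int × Int) :=
  (PySem.List.pyRange (y1+1) (y2+1) 1).map (fun y => (x1, y))
  ++ (PySem.List.pyRange (x1+1) (x2+1) 1).map (fun x => (x, y2))
  ++ (PySem.List.pyRange (y2-1) (y1-1) (-1)).map (fun y => (x2, y))
  ++ (PySem.List.pyRange (x2-1) (x1-1) (-1)).map (fun x => (x, y1))

-- the perimeter positions A reads into tmp
def readCells (x1 y1 x2 y2 : Int) : List (Int × Int) :=
  (PySem.List.pyRange y1 y2 1).map (fun y => (x1, y))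
  ++ (PySem.List.pyRange x1 x2 1).map (fun x => (x, y2))
  ++ (PySem.List.pyRange y2 y1 (-1)).map (fun y => (x2, y))
  ++ (PySem.List.pyRange x2 x1 (-1)).map (fun x => (x, y1))

def writesFold (ps : List ((Int × Int) × Int)) (t : List (List Int)) : List (List Int) :=
  ps.foldl (fun t p => setCell t p.1.1 p.1.2 p.2) t

-- countdown twin of pyRange_one_succ_right
lemma pyRange_neg_one_pred_right (a b : Int) (h : b ≤ a) :
    PySem.List.pyRange a (b-1) (-1) = PySem.List.pyRange a b (-1) ++ [b] := by
  rw [PySem.List.pyRange_neg_one_eq_reverse, PySem.List.pyRange_neg_one_eq_reverse]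
  have hb : b - 1 + 1 = b := by ring
  rw [hb, PySem.List.pyRange_one_cons (show b < a + 1 by omega)]
  simp

-- the write cycle is the read cycle rotated one step clockwise
lemma cycle_rot (x1 y1 x2 y2 : Int) (hx : x1 < x2) (hy : y1 < y2) :
    readCells x1 y1 x2 y2 ++ [(x1, y1)] = (x1, y1) :: writeCells x1 y1 x2 y2 := by
  unfold readCells writeCells
  rw [PySem.List.pyRange_one_cons hy, PySem.List.pyRange_one_cons hx,
      PySem.List.pyRange_neg_one_cons hy, PySem.List.pyRange_neg_one_cons hx,
      PySem.List.pyRange_one_succ_right (show y1 + 1 ≤ y2 by omega),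
      PySem.List.pyRange_one_succ_right (show x1 + 1 ≤ x2 by omega),
      pyRange_neg_one_pred_right (y2-1) y1 (by omega),
      pyRange_neg_one_pred_right (x2-1) x1 (by omega)]
  simp

lemma nodup_writeCells (x1 y1 x2 y2 : Int) (hx : x1 < x2) (hy : y1 < y2) :
    (writeCells x1 y1 x2 y2).Nodup := by
  have hinj1 : ∀ x : Int, Function.Injective (fun y : Int => (x, y)) := by
    intro x u v h
    simpa using h
  have hinj2 : ∀ y : Int, Function.Injective (fun x : Int => (x, y)) := by
    intro y u v h
    simpa using h
  have hneg : ∀ a b : Int, (PySem.List.pyRange a b (-1)).Nodup := by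
    intro a b
    rw [PySem.List.pyRange_neg_one_eq_reverse, List.nodup_reverse]
    exact PySem.List.nodup_pyRange_one _ _
  have hm1 : ∀ p : Int × Int, p ∈ (PySem.List.pyRange (y1+1) (y2+1) 1).map
      (fun y => (x1, y)) → p.1 = x1 ∧ y1 + 1 ≤ p.2 ∧ p.2 < y2 + 1 := by
    rintro p hp
    simp only [List.mem_map, PySem.List.mem_pyRange_one] at hp
    obtain ⟨z, hz, rfl⟩ := hp
    exact ⟨rfl, hz.1, hz.2⟩
  have hm2 : ∀ p : Int × Int, p ∈ (PySem.List.pyRange (x1+1) (x2+1) 1).map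
      (fun x => (x, y2)) → p.2 = y2 ∧ x1 + 1 ≤ p.1 ∧ p.1 < x2 + 1 := by
    rintro p hp
    simp only [List.mem_map, PySem.List.mem_pyRange_one] at hp
    obtain ⟨z, hz, rfl⟩ := hp
    exact ⟨rfl, hz.1, hz.2⟩
  have hm3 : ∀ p : Int × Int, p ∈ (PySem.List.pyRange (y2-1) (y1-1) (-1)).map
      (fun y => (x2, y)) → p.1 = x2 ∧ y1 - 1 < p.2 ∧ p.2 ≤ y2 - 1 := by
    rintro p hp
    simp only [List.mem_map, PySem.List.mem_pyRange_neg_one] at hp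
    obtain ⟨z, hz, rfl⟩ := hp
    exact ⟨rfl, hz.1, hz.2⟩
  have hm4 : ∀ p : Int × Int, p ∈ (PySem.List.pyRange (x2-1) (x1-1) (-1)).map
      (fun x => (x, y1)) → p.2 = y1 ∧ x1 - 1 < p.1 ∧ p.1 ≤ x2 - 1 := by
    rintro p hp
    simp only [List.mem_map, PySem.List.mem_pyRange_neg_one] at hp
    obtain ⟨z, hz, rfl⟩ := hp
    exact ⟨rfl, hz.1, hz.2⟩
  unfold writeCells
  refine List.nodup_append.2 ⟨List.nodup_append.2 ⟨List.nodup_append.2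
    ⟨List.Nodup.map (hinj1 x1) (PySem.List.nodup_pyRange_one _ _),
     List.Nodup.map (hinj2 y2) (PySem.List.nodup_pyRange_one _ _), ?_⟩,
     List.Nodup.map (hinj1 x2) (hneg _ _), ?_⟩,
     List.Nodup.map (hinj2 y1) (hneg _ _), ?_⟩
  · intro a h1 b h2 h
    subst h
    have := hm1 a h1
    have := hm2 a h2
    omega
  · intro a h12 b h3 h
    subst h
    have := hm3 a h3
    rcases List.mem_append.1 h12 with h | h
    · have := hm1 a h
      omega
    · have := hm2 a h
      omega
  · intro a h123 b h4 h
    subst h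
    have := hm4 a h4
    rcases List.mem_append.1 h123 with h12 | h
    · rcases List.mem_append.1 h12 with h | h
      · have := hm1 a h
        omega
      · have := hm2 a h
        omega
    · have := hm3 a h
      omega

lemma nonneg_writeCells (x1 y1 x2 y2 : Int) (hx1 : 0 ≤ x1) (hy1 : 0 ≤ y1)
    (hx : x1 < x2) (hy : y1 < y2) :
    ∀ p ∈ writeCells x1 y1 x2 y2, 0 ≤ p.1 ∧ 0 ≤ p.2 := by
  unfold writeCells
  simp only [List.mem_append, List.mem_map, PySem.List.mem_pyRange_one,
    PySem.List.mem_pyRange_neg_one]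
  rintro p (((⟨z, hz, rfl⟩ | ⟨z, hz, rfl⟩) | ⟨z, hz, rfl⟩) | ⟨z, hz, rfl⟩) <;>
    exact ⟨by dsimp only; omega, by dsimp only; omega⟩

-- characterization of B's single-pass fold
lemma bFold_eq (cs : List (Int × Int)) (t : List (List Int)) (prev best : Int)
    (hnd : cs.Nodup) (hnn : ∀ p ∈ cs, 0 ≤ p.1 ∧ 0 ≤ p.2) :
    cs.foldl (fun (st : Int × Int × List (List Int)) rc =>
        (getCell st.2.2 rc.1 rc.2,
         if getCell st.2.2 rc.1 rc.2 < st.2.1 then getCell st.2.2 rc.1 rc.2 else st.2.1,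
         setCell st.2.2 rc.1 rc.2 st.1)) (prev, best, t) =
      ((prev :: cs.map (fun p => getCell t p.1 p.2)).getLast (List.cons_ne_nil _ _),
       (cs.map (fun p => getCell t p.1 p.2)).foldl (fun b v => if v < b then v else b) best,
       writesFold (cs.zip (prev :: cs.map (fun p => getCell t p.1 p.2))) t) := by
  induction cs generalizing t prev best with
  | nil => simp [writesFold]
  | cons p cs ih =>
    have hp := hnn p (List.mem_cons_self)
    have hmap : cs.map (fun q => getCell (setCell t p.1 p.2 prev) q.1 q.2)
        = cs.map (fun q => getCell t q.1 q.2) := by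
      refine List.map_congr_left fun q hq => ?_
      have hq' := hnn q (List.mem_cons_of_mem _ hq)
      refine getCell_setCell_ne t prev hp.1 hp.2 hq'.1 hq'.2 ?_
      intro h
      have : p = q := by
        have h1 : p.1 = q.1 := congrArg Prod.fst h
        have h2 : p.2 = q.2 := congrArg Prod.snd h
        exact Prod.ext h1 h2
      exact (List.nodup_cons.1 hnd).1 (this ▸ hq)
    simp only [List.foldl_cons, List.map_cons]
    rw [ih (setCell t p.1 p.2 prev) (getCell t p.1 p.2)
        (if getCell t p.1 p.2 < best then getCell t p.1 p.2 else best)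
        (List.nodup_cons.1 hnd).2 (fun q hq => hnn q (List.mem_cons_of_mem _ hq))]
    rw [hmap]
    refine Prod.ext ?_ (Prod.ext ?_ ?_)
    · simp [List.getLast_cons]
    · simp
    · simp [writesFold]

-- A's indexed write loop over a cell list is writesFold over cells zipped with tmp
lemma aWrites_eq (cs : List (Int × Int)) (i : Int) (t : List (List Int)) (vs : List Int)
    (hi : 0 ≤ i) (hlen : i.toNat + cs.length ≤ vs.length) :
    cs.foldl (fun (st : Int × List (List Int)) p =>
        (st.1 + 1, setCell st.2 p.1 p.2 (PySem.List.pyGetD vs st.1 0))) (i, t) =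
      (i + cs.length, writesFold (cs.zip (vs.drop i.toNat)) t) := by
  induction cs generalizing i t with
  | nil => simp [writesFold]
  | cons p cs ih =>
    have hi' : i.toNat < vs.length := by
      simp only [List.length_cons] at hlen
      omega
    simp only [List.foldl_cons, List.length_cons]
    rw [ih (i + 1) (setCell t p.1 p.2 (PySem.List.pyGetD vs i 0)) (by omega)
        (by simp only [List.length_cons] at hlen; omega)]
    have hdrop : vs.drop i.toNat = vs[i.toNat] :: vs.drop (i.toNat + 1) := by
      exact List.drop_eq_getElem_cons hi'
    have hnext : (i + 1).toNat = i.toNat + 1 := by omega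
    rw [hnext]
    have hv : PySem.List.pyGetD vs i 0 = vs[i.toNat] := by
      rw [pyGetD_nonneg _ _ _ hi, List.getD_eq_getElem?_getD, List.getElem?_eq_getElem hi']
      rfl
    refine Prod.ext ?_ ?_
    · dsimp only
      push_cast
      ring
    · rw [hdrop, List.zip_cons_cons]
      simp [writesFold, hv]

lemma foldl_min_le (l : List Int) (a : Int) : l.foldl min a ≤ a := by
  induction l generalizing a with
  | nil => simp
  | cons x l ih =>
    calc (x :: l).foldl min a = l.foldl min (min a x) := by simp
    _ ≤ min a x := ih _
    _ ≤ a := min_le_left _ _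

lemma zip_append_right (l : List (Int × Int)) (l2 r2 : List Int)
    (h : l.length = l2.length) : l.zip (l2 ++ r2) = l.zip l2 := by
  rw [← List.append_nil l, List.zip_append h]
  simp

lemma core_eq (t : List (List Int)) (x1 y1 x2 y2 : Int)
    (hx1 : 0 ≤ x1) (hy1 : 0 ≤ y1) (hx : x1 < x2) (hy : y1 < y2) :
    aCore t x1 y1 x2 y2 = bCore t x1 y1 x2 y2 := by
  have hrot := cycle_rot x1 y1 x2 y2 hx hy
  have hlenW : (writeCells x1 y1 x2 y2).length = (readCells x1 y1 x2 y2).length := by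
    have := congrArg List.length hrot
    simp at this
    omega
  have hRne : readCells x1 y1 x2 y2 ≠ [] := by
    intro h
    have := congrArg List.length h
    unfold readCells at this
    simp [PySem.List.length_pyRange_one] at this
    omega
  have hmapsrot : (readCells x1 y1 x2 y2).map (fun p => getCell t p.1 p.2)
      ++ [getCell t x1 y1]
      = getCell t x1 y1 :: (writeCells x1 y1 x2 y2).map (fun p => getCell t p.1 p.2) := by
    simpa using congrArg (List.map (fun p : Int × Int => getCell t p.1 p.2)) hrot
  unfold aCore bCore
  dsimp only
  rw [PySem.List.foldl_append_singleton_eq_map, PySem.List.foldl_append_singleton_eq_map,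
      PySem.List.foldl_append_singleton_eq_map, PySem.List.foldl_append_singleton_eq_map]
  simp only [List.nil_append]
  have htmp : List.map (getCell t x1) (PySem.List.pyRange y1 y2) ++
        List.map (fun x => getCell t x y2) (PySem.List.pyRange x1 x2) ++
        List.map (getCell t x2) (PySem.List.pyRange y2 y1 (-1)) ++
        List.map (fun x => getCell t x y1) (PySem.List.pyRange x2 x1 (-1))
      = (readCells x1 y1 x2 y2).map (fun p => getCell t p.1 p.2) := by
    unfold readCells
    simp [List.map_map, Function.comp_def]
  rw [htmp]
  have hw : ∀ vs : List Int,
      List.foldl (fun st x => (st.1 + 1, setCell st.2 x y1 (PySem.List.pyGetD vs st.1 0)))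
        (List.foldl (fun st y => (st.1 + 1, setCell st.2 x2 y (PySem.List.pyGetD vs st.1 0)))
          (List.foldl (fun st x => (st.1 + 1, setCell st.2 x y2 (PySem.List.pyGetD vs st.1 0)))
            (List.foldl (fun st y => (st.1 + 1, setCell st.2 x1 y (PySem.List.pyGetD vs st.1 0)))
              ((0 : Int), t) (PySem.List.pyRange (y1 + 1) (y2 + 1)))
            (PySem.List.pyRange (x1 + 1) (x2 + 1)))
          (PySem.List.pyRange (y2 - 1) (y1 - 1) (-1)))
        (PySem.List.pyRange (x2 - 1) (x1 - 1) (-1))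
      = (writeCells x1 y1 x2 y2).foldl
          (fun st p => (st.1 + 1, setCell st.2 p.1 p.2 (PySem.List.pyGetD vs st.1 0)))
          ((0 : Int), t) := by
    intro vs
    unfold writeCells
    rw [List.foldl_append, List.foldl_append, List.foldl_append,
        List.foldl_map, List.foldl_map, List.foldl_map, List.foldl_map]
  rw [hw]
  rw [aWrites_eq (writeCells x1 y1 x2 y2) 0 t
        ((readCells x1 y1 x2 y2).map (fun p => getCell t p.1 p.2)) le_rfl
        (by simp [hlenW])]
  have hcells : List.map (fun y => (x1, y)) (PySem.List.pyRange (y1 + 1) (y2 + 1)) ++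
        List.map (fun x => (x, y2)) (PySem.List.pyRange (x1 + 1) (x2 + 1)) ++
        List.map (fun y => (x2, y)) (PySem.List.pyRange (y2 - 1) (y1 - 1) (-1)) ++
        List.map (fun x => (x, y1)) (PySem.List.pyRange (x2 - 1) (x1 - 1) (-1))
      = writeCells x1 y1 x2 y2 := rfl
  rw [hcells]
  rw [bFold_eq (writeCells x1 y1 x2 y2) t (getCell t x1 y1) (getCell t x1 y1)
        (nodup_writeCells x1 y1 x2 y2 hx hy)
        (nonneg_writeCells x1 y1 x2 y2 hx1 hy1 hx hy)]
  obtain ⟨v, vs, hR⟩ : ∃ v vs, (readCells x1 y1 x2 y2).map (fun p => getCell t p.1 p.2)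
      = v :: vs := by
    rcases hRl : (readCells x1 y1 x2 y2).map (fun p => getCell t p.1 p.2) with _ | ⟨v, vs⟩
    · exact absurd (List.map_eq_nil_iff.1 hRl) hRne
    · exact ⟨v, vs, hRl⟩
  rw [hR]
  rw [hR] at hmapsrot
  simp only [List.cons_append] at hmapsrot
  obtain ⟨hv, htail⟩ := List.cons_eq_cons.mp hmapsrot
  have hW : (writeCells x1 y1 x2 y2).map (fun p => getCell t p.1 p.2)
      = vs ++ [getCell t x1 y1] := htail.symm
  refine Prod.ext ?_ ?_
  · -- the final tables agree
    dsimp only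
    simp only [Int.toNat_zero, List.drop_zero]
    rw [hW, ← hv]
    rw [show v :: (vs ++ [v]) = (v :: vs) ++ [v] by simp]
    rw [zip_append_right _ _ _ (by
      have := congrArg List.length hR
      simp only [List.length_map, List.length_cons] at this ⊢
      omega)]
  · -- the reported minima agree
    dsimp only
    rw [PySem.List.min?_id_cons, Option.getD_some, hW, ← hv]
    have hif : ∀ (l : List Int) (a : Int),
        l.foldl (fun b w => if w < b then w else b) a = l.foldl min a := by
      intro l a
      refine PySem.List.foldl_congr_mem _ _ _ _ ?_
      intro acc x _
      split_ifs with h <;> omega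
    rw [hif, List.foldl_append]
    simp only [List.foldl_cons, List.foldl_nil]
    have hle : (vs.foldl min v) ≤ v := foldl_min_le vs v
    omega

lemma query_eq (t : List (List Int)) (q : List Int) (rows columns : Int)
    (hq : qOK rows columns q = true) : aQuery t q = bQuery t q := by
  unfold qOK at hq
  simp only [Bool.and_eq_true, decide_eq_true_eq] at hq
  unfold aQuery bQuery
  simp only [PySem.List.pyGetD_ofNat']
  exact core_eq t _ _ _ _ (by omega) (by omega) (by omega) (by omega)

-- ===== VERDICT (by name: the statement is the Claim_ definition above) =====
theorem solution_spec : Claim_equal_solution := by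
  intro rows columns queries _ hpre
  unfold Spec_solution solution solution_alt
  suffices h : ∀ (qs : List (List Int)) (st : List Int × List (List Int)),
      (∀ q ∈ qs, qOK rows columns q = true) →
      qs.foldl (fun st query => (st.1 ++ [(aQuery st.2 query).2], (aQuery st.2 query).1)) st
      = qs.foldl (fun st query => (st.1 ++ [(bQuery st.2 query).2], (bQuery st.2 query).1)) st by
    exact congrArg Prod.fst
      (h queries (([] : List Int), (buildTable rows columns).2) hpre)
  intro qs
  induction qs with
  | nil => intro st _; rfl
  | cons q qs ih =>
    intro st h
    simp only [List.foldl_cons]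
    rw [query_eq st.2 q rows columns (h q List.mem_cons_self)]
    exact ih _ (fun q' hq' => h q' (List.mem_cons_of_mem _ hq'))
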